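-- pv_equiv track=rewrite | github.com/luaartist/kicad-schematic-importer-windows | analyze_kicad_examples.py | preprocess_yaml_content
-- ===== SOURCE A (Python) =====
-- def preprocess_yaml_content(content: str) -> str:
--     """
--     Preprocess YAML content by replacing placeholders with default values
--     """
--     # Common KiBot placeholders and their default values
--     placeholders = {
--         '@_KIBOT_IMPORT_DIR@': './import',
--         '@_KIBOT_MANF_DIR@': './manufacturing',
--         '@_KIBOT_CHKZONE_THRESHOLD@': '0.5',
--         '@LAYERS@': 'F.Cu,B.Cu',
--         '@ID@': 'default',
--         '@UNITS@': 'millimeters'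
--     }
--
--     # Replace all placeholders
--     for placeholder, default_value in placeholders.items():
--         content = content.replace(placeholder, default_value)
--
--     return content
-- ===== SOURCE B (Python) =====
-- def preprocess_yaml_content(content: str) -> str:
--     """
--     Preprocess YAML content by replacing placeholders with default values
--     (recursive descent over a pair list; each substitution via split/join).
--     """
--     pairs = [
--         ('@_KIBOT_IMPORT_DIR@', './import'),
--         ('@_KIBOT_MANF_DIR@', './manufacturing'),
--         ('@_KIBOT_CHKZONE_THRESHOLD@', '0.5'),
--         ('@LAYERS@', 'F.Cu,B.Cu'),
--         ('@ID@', 'default'),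
--         ('@UNITS@', 'millimeters'),
--     ]
--
--     def fill(text, rest):
--         if not rest:
--             return text
--         key, val = rest[0]
--         return fill(val.join(text.split(key)), rest[1:])
--
--     return fill(content, pairs)
-- ===== Notes on version B (the rewrite author's own statement) =====
-- stated objective: alternative
-- what changed: Replaces the dict loop of sequential content.replace calls with a recursion over a pair list that performs each substitution as val.join(text.split(key)).
import Mathlib
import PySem

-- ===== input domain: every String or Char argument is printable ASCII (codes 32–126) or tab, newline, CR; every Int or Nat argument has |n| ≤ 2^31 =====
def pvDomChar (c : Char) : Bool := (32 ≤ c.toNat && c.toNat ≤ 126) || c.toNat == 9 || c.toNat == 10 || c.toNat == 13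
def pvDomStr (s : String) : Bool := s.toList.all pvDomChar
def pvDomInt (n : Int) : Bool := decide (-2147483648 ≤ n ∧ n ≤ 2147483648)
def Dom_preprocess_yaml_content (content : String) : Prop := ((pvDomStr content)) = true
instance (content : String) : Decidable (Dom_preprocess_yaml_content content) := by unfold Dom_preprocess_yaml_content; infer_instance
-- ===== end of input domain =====

-- B replaces the dict-loop of sequential str.replace calls by a recursion over a pair list
-- doing each substitution via split/join (alternative decomposition, same cost).


-- ===== PORT A =====
-- literal port: the placeholder dict, then a loop over its items doing content.replace
def preprocess_yaml_content (content : String) : String :=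
  let placeholders : PySem.Dict String String :=
    (((((PySem.Dict.empty.insert "@_KIBOT_IMPORT_DIR@" "./import").insert
        "@_KIBOT_MANF_DIR@" "./manufacturing").insert
        "@_KIBOT_CHKZONE_THRESHOLD@" "0.5").insert
        "@LAYERS@" "F.Cu,B.Cu").insert "@ID@" "default").insert "@UNITS@" "millimeters"
  placeholders.items.foldl (fun c pv => PySem.Str.replace c pv.1 pv.2) content

-- ===== PORT B =====
-- text.split(key) for a nonempty literal key: the sep ≠ "" form of Python str.split,
-- exact via PySem.Chars.splitOn (PySem.Str has only the Option-valued split?)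
def pvSplit (s sep : String) : List String :=
  (PySem.Chars.splitOn s.toList sep.toList).map String.ofList

-- B's recursive fill over the remaining pairs
def pvFill (text : String) : List (String × String) → String
  | [] => text
  | (key, val) :: rs => pvFill (PySem.Str.join val (pvSplit text key)) rs

def preprocess_yaml_content_alt (content : String) : String :=
  pvFill content
    [("@_KIBOT_IMPORT_DIR@", "./import"),
     ("@_KIBOT_MANF_DIR@", "./manufacturing"),
     ("@_KIBOT_CHKZONE_THRESHOLD@", "0.5"),
     ("@LAYERS@", "F.Cu,B.Cu"),
     ("@ID@", "default"),
     ("@UNITS@", "millimeters")]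

-- ===== PRECONDITION & SPEC =====
def Spec_preprocess_yaml_content (content : String) (out : String) : Prop := out = preprocess_yaml_content_alt content
instance (content : String) (out : String) : Decidable (Spec_preprocess_yaml_content content out) := by unfold Spec_preprocess_yaml_content; infer_instance

-- ===== CLAIM (what is proved, stated in full; the proofs are below) =====
def Claim_equal_preprocess_yaml_content : Prop := ∀ (content : String), Dom_preprocess_yaml_content content → Spec_preprocess_yaml_content content (preprocess_yaml_content content)

-- ===== LEMMAS AND PROOFS =====

-- reference form of one sequential replacement pass (old nonempty makes it total)
def pvRep (old new : List Char) : List Char → List Char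
  | [] => []
  | c :: t =>
    if old.isPrefixOf (c :: t) then new ++ pvRep old new (t.drop (old.length - 1))
    else c :: pvRep old new t
termination_by l => l.length
decreasing_by
  · simp [List.length_drop]
  · simp

-- reference form of splitting on old (old nonempty)
def pvSp (old : List Char) : List Char → List Char → List (List Char)
  | [], cur => [cur.reverse]
  | c :: t, cur =>
    if old.isPrefixOf (c :: t) then cur.reverse :: pvSp old (t.drop (old.length - 1)) []
    else pvSp old t (c :: cur)
termination_by l _ => l.length
decreasing_by
  · simp [List.length_drop]
  · simp

lemma pvReplaceGo (old new : List Char) (h : old ≠ []) :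
    ∀ (fuel : Nat) (l acc : List Char), l.length ≤ fuel →
      PySem.Chars.replace.go old new fuel l acc = acc.reverse ++ pvRep old new l := by
  intro fuel
  induction fuel with
  | zero =>
    intro l acc hl
    have hnil : l = [] := by cases l <;> simp_all
    subst hnil
    simp [PySem.Chars.replace.go, pvRep]
  | succ f ih =>
    intro l acc hl
    cases l with
    | nil => simp [PySem.Chars.replace.go, pvRep]
    | cons c t =>
      obtain ⟨k, hk⟩ : ∃ k, old.length = k + 1 := by
        cases old with
        | nil => exact absurd rfl h
        | cons a b => exact ⟨b.length, rfl⟩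
      by_cases hp : old.isPrefixOf (c :: t) = true
      · rw [show PySem.Chars.replace.go old new (f + 1) (c :: t) acc
            = PySem.Chars.replace.go old new f ((c :: t).drop old.length) (new.reverse ++ acc) by
          simp [PySem.Chars.replace.go, hp]]
        rw [ih _ _ (by simp [List.length_drop] at hl ⊢; omega)]
        simp [pvRep, hp, hk]
      · rw [show PySem.Chars.replace.go old new (f + 1) (c :: t) acc
            = PySem.Chars.replace.go old new f t (c :: acc) by
          simp [PySem.Chars.replace.go, hp]]
        rw [ih _ _ (by simp at hl ⊢; omega)]
        simp [pvRep, hp]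

lemma pvSplitGo (old : List Char) (h : old ≠ []) :
    ∀ (fuel : Nat) (l cur : List Char) (acc : List (List Char)), l.length < fuel →
      PySem.Chars.splitOn.go old fuel l cur acc = acc.reverse ++ pvSp old l cur := by
  intro fuel
  induction fuel with
  | zero => intro l cur acc hl; omega
  | succ f ih =>
    intro l cur acc hl
    cases l with
    | nil => simp [PySem.Chars.splitOn.go, pvSp]
    | cons c t =>
      obtain ⟨k, hk⟩ : ∃ k, old.length = k + 1 := by
        cases old with
        | nil => exact absurd rfl h
        | cons a b => exact ⟨b.length, rfl⟩
      by_cases hp : old.isPrefixOf (c :: t) = true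
      · rw [show PySem.Chars.splitOn.go old (f + 1) (c :: t) cur acc
            = PySem.Chars.splitOn.go old f ((c :: t).drop old.length) [] (cur.reverse :: acc) by
          simp [PySem.Chars.splitOn.go, hp]]
        rw [ih _ _ _ (by simp [List.length_drop] at hl ⊢; omega)]
        simp [pvSp, hp, hk]
      · rw [show PySem.Chars.splitOn.go old (f + 1) (c :: t) cur acc
            = PySem.Chars.splitOn.go old f t (c :: cur) acc by
          simp [PySem.Chars.splitOn.go, hp]]
        rw [ih _ _ _ (by simp at hl ⊢; omega)]
        simp [pvSp, hp]

lemma pvSp_ne_nil (old l cur : List Char) : pvSp old l cur ≠ [] := by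
  induction l, cur using pvSp.induct old with
  | case1 cur => simp [pvSp]
  | case2 c t cur hp ih => simp [pvSp, hp]
  | case3 c t cur hp ih => simpa [pvSp, hp] using ih

lemma pvJoinSp (old new : List Char) :
    ∀ (l cur : List Char),
      PySem.Chars.join new (pvSp old l cur) = cur.reverse ++ pvRep old new l := by
  intro l
  induction l, ([] : List Char) using pvSp.induct old with
  | case1 cur => intro cur; simp [pvSp, pvRep, PySem.Chars.join_singleton]
  | case2 c t cur' hp ih =>
    intro cur
    rw [show pvSp old (c :: t) cur
        = cur.reverse :: pvSp old (t.drop (old.length - 1)) [] by simp [pvSp, hp]]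
    obtain ⟨q, qs, hq⟩ : ∃ q qs, pvSp old (t.drop (old.length - 1)) [] = q :: qs := by
      cases hs : pvSp old (t.drop (old.length - 1)) [] with
      | nil => exact absurd hs (pvSp_ne_nil _ _ _)
      | cons q qs => exact ⟨q, qs, rfl⟩
    rw [hq, PySem.Chars.join_cons_cons, ← hq, ih]
    simp [pvRep, hp]
  | case3 c t cur' hp ih =>
    intro cur
    rw [show pvSp old (c :: t) cur = pvSp old t (c :: cur) by simp [pvSp, hp], ih]
    simp [pvRep, hp]

lemma pvCharsStep (old new s : List Char) (h : old ≠ []) :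
    PySem.Chars.join new (PySem.Chars.splitOn s old) = PySem.Chars.replace s old new := by
  unfold PySem.Chars.splitOn PySem.Chars.replace
  rw [pvSplitGo old h (s.length + 1) s [] [] (by omega)]
  rw [if_neg (by simp [h]), pvReplaceGo old new h s.length s [] (le_refl _)]
  simpa using pvJoinSp old new s []

lemma pvStrStep (s old new : String) (h : old.toList ≠ []) :
    PySem.Str.join new (pvSplit s old) = PySem.Str.replace s old new := by
  simp only [PySem.Str.join, pvSplit, PySem.Str.replace, List.map_map]
  congr 1
  rw [show List.map (String.toList ∘ String.ofList) (PySem.Chars.splitOn s.toList old.toList)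
      = PySem.Chars.splitOn s.toList old.toList by simp [Function.comp_def]]
  exact pvCharsStep old.toList new.toList s.toList h

-- ===== VERDICT (by name: the statement is the Claim_ definition above) =====
theorem preprocess_yaml_content_spec : Claim_equal_preprocess_yaml_content := by
  intro content _
  unfold Spec_preprocess_yaml_content
  show preprocess_yaml_content content = preprocess_yaml_content_alt content
  have hA : preprocess_yaml_content content
      = PySem.Str.replace (PySem.Str.replace (PySem.Str.replace (PySem.Str.replace
          (PySem.Str.replace (PySem.Str.replace content
          "@_KIBOT_IMPORT_DIR@" "./import") "@_KIBOT_MANF_DIR@" "./manufacturing")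
          "@_KIBOT_CHKZONE_THRESHOLD@" "0.5") "@LAYERS@" "F.Cu,B.Cu")
          "@ID@" "default") "@UNITS@" "millimeters" := rfl
  have hB : preprocess_yaml_content_alt content
      = PySem.Str.join "millimeters" (pvSplit (PySem.Str.join "default" (pvSplit
          (PySem.Str.join "F.Cu,B.Cu" (pvSplit (PySem.Str.join "0.5" (pvSplit
          (PySem.Str.join "./manufacturing" (pvSplit (PySem.Str.join "./import"
          (pvSplit content "@_KIBOT_IMPORT_DIR@")) "@_KIBOT_MANF_DIR@"))
          "@_KIBOT_CHKZONE_THRESHOLD@")) "@LAYERS@")) "@ID@")) "@UNITS@") := rfl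
  rw [hA, hB,
    pvStrStep _ _ _ (by decide), pvStrStep _ _ _ (by decide), pvStrStep _ _ _ (by decide),
    pvStrStep _ _ _ (by decide), pvStrStep _ _ _ (by decide), pvStrStep _ _ _ (by decide)]
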